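-- pv_equiv track=rewrite | github.com/pypi-data/pypi-mirror-395 | packages/zetaq-edu-diff-engine/zetaq_edu_diff_engine-0.1.0.tar.gz/zetaq_edu_diff_engine-0.1.0/src/edu_diff_engine/engine.py | _segment_pdf
-- ===== SOURCE A (Python) =====
-- from typing import List, Optional
--
-- def _segment_pdf(text: str, num_segments: int) -> List[str]:
--     """
--     Split the full PDF text into `num_segments` contiguous segments.
--     These roughly correspond to early/mid/late parts of the chapter.
--     """
--     length = len(text)
--     if length == 0 or num_segments <= 1:
--         return [text]
--
--     seg_size = max(1, length // num_segments)
--     segments = []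
--     for i in range(num_segments):
--         start = i * seg_size
--         end = length if i == num_segments - 1 else (i + 1) * seg_size
--         segments.append(text[start:end])
--     return segments
-- ===== SOURCE B (Python) =====
-- def _segment_pdf(text, num_segments):
--     length = len(text)
--     if length == 0 or num_segments <= 1:
--         return [text]
--     seg_size = max(1, length // num_segments)
--     segments = []
--     rest = text
--     for _ in range(num_segments - 1):
--         segments.append(rest[:seg_size])
--         rest = rest[seg_size:]
--     segments.append(rest)
--     return segments
-- ===== Notes on version B (the rewrite author's own statement) =====
-- stated objective: alternative
-- what changed: B consumes the string with an accumulator: it repeatedly peels a seg_size-character prefix off the remaining text (rest[:seg_size] / rest[seg_size:]) num_segments-1 times and appends the leftover rest, instead of A's per-index start/end offset arithmetic into the original string.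
import Mathlib
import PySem

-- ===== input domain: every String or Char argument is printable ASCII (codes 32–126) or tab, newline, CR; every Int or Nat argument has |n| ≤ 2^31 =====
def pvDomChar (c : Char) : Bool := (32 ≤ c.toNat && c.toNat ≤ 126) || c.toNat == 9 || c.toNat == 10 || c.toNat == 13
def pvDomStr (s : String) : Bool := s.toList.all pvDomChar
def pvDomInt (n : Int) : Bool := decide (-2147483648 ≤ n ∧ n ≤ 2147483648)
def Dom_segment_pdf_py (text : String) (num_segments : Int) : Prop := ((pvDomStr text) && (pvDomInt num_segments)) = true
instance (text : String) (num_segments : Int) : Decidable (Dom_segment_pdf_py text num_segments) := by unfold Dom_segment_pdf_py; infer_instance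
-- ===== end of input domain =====

-- B consumes the string by repeated head-split (peel a seg_size prefix, recurse on the rest)
-- instead of computing per-index start/end offsets into the original; objective: alternative.


-- ===== PORT A =====
def segment_pdf_py (text : String) (num_segments : Int) : List String :=
  let length : Int := PySem.Str.len text
  if length = 0 ∨ num_segments ≤ 1 then [text]
  else
    let seg_size : Int := max 1 (PySem.Int.floordiv length num_segments)
    (PySem.List.pyRange 0 num_segments 1).foldl
      (fun segments i =>
        let start := i * seg_size
        let «end» := if i = num_segments - 1 then length else (i + 1) * seg_size
        segments ++ [PySem.Str.slice text (some start) (some «end»)]) []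

-- ===== PORT B =====
def segment_pdf_py_alt (text : String) (num_segments : Int) : List String :=
  let length : Int := PySem.Str.len text
  if length = 0 ∨ num_segments ≤ 1 then [text]
  else
    let seg_size : Int := max 1 (PySem.Int.floordiv length num_segments)
    let st := (PySem.List.pyRange 0 (num_segments - 1) 1).foldl
      (fun (st : List String × String) _ =>
        (st.1 ++ [PySem.Str.slice st.2 none (some seg_size)],
         PySem.Str.slice st.2 (some seg_size) none))
      ([], text)
    st.1 ++ [st.2]

-- ===== PRECONDITION & SPEC =====
def Spec_segment_pdf_py (text : String) (num_segments : Int) (out : List String) : Prop := out = segment_pdf_py_alt text num_segments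
instance (text : String) (num_segments : Int) (out : List String) : Decidable (Spec_segment_pdf_py text num_segments out) := by unfold Spec_segment_pdf_py; infer_instance

-- ===== CLAIM (what is proved, stated in full; the proofs are below) =====
def Claim_equal_segment_pdf_py : Prop := ∀ (text : String) (num_segments : Int), Dom_segment_pdf_py text num_segments → Spec_segment_pdf_py text num_segments (segment_pdf_py text num_segments)

-- ===== LEMMAS AND PROOFS =====

-- strings are equal when their character lists are
theorem pvStrExt {s t : String} (h : s.toList = t.toList) : s = t :=
  String.toList_inj.mp h

-- text[a:][: seg] = text[a : a+seg]  (0 ≤ a, 0 ≤ seg)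
theorem pvSliceTake (text : String) (a seg : Int) (ha : 0 ≤ a) (hs : 0 ≤ seg) :
    PySem.Str.slice (PySem.Str.slice text (some a) none) none (some seg)
      = PySem.Str.slice text (some a) (some (a + seg)) := by
  apply pvStrExt
  simp only [PySem.Str.toList_slice, PySem.Chars.slice_eq_listSlice]
  rw [PySem.List.slice_from _ ha, PySem.List.slice_to _ hs,
      PySem.List.slice_toNat _ ha (by omega)]
  congr 1
  omega

-- text[a:][seg:] = text[a+seg:]  (0 ≤ a, 0 ≤ seg)
theorem pvSliceDrop (text : String) (a seg : Int) (ha : 0 ≤ a) (hs : 0 ≤ seg) :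
    PySem.Str.slice (PySem.Str.slice text (some a) none) (some seg) none
      = PySem.Str.slice text (some (a + seg)) none := by
  apply pvStrExt
  simp only [PySem.Str.toList_slice, PySem.Chars.slice_eq_listSlice]
  rw [PySem.List.slice_from _ ha, PySem.List.slice_from _ hs,
      PySem.List.slice_from _ (by omega : (0:Int) ≤ a + seg)]
  rw [List.drop_drop]
  congr 1
  omega

-- loop invariant of B's peeling fold
theorem pvPeelLoop (seg : Int) (hs : 0 ≤ seg) (text : String) :
    ∀ (k : Nat) (m : Int), 0 ≤ m → m.toNat = k →
    (PySem.List.pyRange 0 m 1).foldl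
        (fun (st : List String × String) _ =>
          (st.1 ++ [PySem.Str.slice st.2 none (some seg)],
           PySem.Str.slice st.2 (some seg) none)) ([], text)
      = ((PySem.List.pyRange 0 m 1).map
           (fun i => PySem.Str.slice text (some (i * seg)) (some ((i + 1) * seg))),
         PySem.Str.slice text (some (m * seg)) none) := by
  intro k
  induction k with
  | zero =>
    intro m hm hk
    have h0 : m = 0 := by omega
    subst h0
    rw [PySem.List.pyRange_one_eq_nil (by omega)]
    simp only [List.foldl_nil, List.map_nil]
    refine Prod.ext rfl ?_
    apply pvStrExt
    simp only [PySem.Str.toList_slice, PySem.Chars.slice_eq_listSlice]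
    norm_num
  | succ k ih =>
    intro m hm hk
    have hm1 : (0:Int) ≤ m - 1 := by omega
    have hsplit : PySem.List.pyRange 0 m 1 = PySem.List.pyRange 0 (m-1) 1 ++ [m-1] := by
      have := PySem.List.pyRange_one_succ_right (a := 0) (b := m-1) (by omega)
      simpa using this
    rw [hsplit, List.foldl_append, ih (m-1) hm1 (by omega)]
    simp only [List.foldl_cons, List.foldl_nil, List.map_append, List.map_cons, List.map_nil]
    have ha : (0:Int) ≤ (m-1) * seg := mul_nonneg hm1 hs
    refine Prod.ext ?_ ?_
    · simp only []
      rw [pvSliceTake text _ _ ha hs,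
          show (m-1) * seg + seg = (m - 1 + 1) * seg by ring]
    · simp only []
      rw [pvSliceDrop text _ _ ha hs,
          show (m-1) * seg + seg = m * seg by ring]

-- text[a : len(text)] = text[a:]  (0 ≤ a)  (stated with the cast form simp leaves)
theorem pvSliceToEnd (text : String) (a : Int) (ha : 0 ≤ a) :
    PySem.Str.slice text (some a) (some (text.length : Int))
      = PySem.Str.slice text (some a) none := by
  apply pvStrExt
  simp only [PySem.Str.toList_slice, PySem.Chars.slice_eq_listSlice]
  rw [PySem.List.slice_toNat _ ha (by positivity), PySem.List.slice_from _ ha]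
  apply List.take_of_length_le
  simp

-- ===== VERDICT (by name: the statement is the Claim_ definition above) =====
theorem segment_pdf_py_spec : Claim_equal_segment_pdf_py := by
  intro text n _
  unfold Spec_segment_pdf_py segment_pdf_py segment_pdf_py_alt
  by_cases hg : PySem.Str.len text = 0 ∨ n ≤ 1
  · simp only [if_pos hg]
  · simp only [hg, if_false]
    push Not at hg
    have hn : (1:Int) < n := by omega
    have hseg : (0:Int) ≤ max 1 (PySem.Int.floordiv (PySem.Str.len text) n) := by
      simp
    rw [pvPeelLoop _ hseg text (n-1).toNat (n-1) (by omega) rfl]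
    rw [PySem.List.foldl_append_singleton_eq_map]
    simp only [List.nil_append]
    have hsplit : PySem.List.pyRange 0 n 1 = PySem.List.pyRange 0 (n-1) 1 ++ [n-1] := by
      have := PySem.List.pyRange_one_succ_right (a := 0) (b := n-1) (by omega)
      simpa using this
    rw [hsplit, List.map_append]
    congr 1
    · apply List.map_congr_left
      intro i hi
      have : i < n - 1 := (PySem.List.mem_pyRange_one.mp hi).2
      simp only [if_neg (by omega : ¬ i = n - 1)]
    · have hn1 : (0:Int) ≤ n - 1 := by omega
      simp
      rw [pvSliceToEnd text _ (by positivity)]
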